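-- pv_equiv track=rewrite | github.com/bellday/Baekjoon | 프로그래머스/lv3/12987. 숫자 게임/숫자 게임.py | solution
-- ===== SOURCE A (Python) =====
-- from collections import deque
--
-- def solution(A, B):
--     answer = 0; i=0
--     A = sorted(A,reverse = True)
--     B = sorted(B, reverse = True)
--     queue = deque(B)
--     while queue:
--         if queue[0]> A[i]:
--             queue.popleft()
--             answer+=1
--         else:
--             queue.pop()
--         i+=1
--
--     return answer
-- ===== SOURCE B (Python) =====
-- def solution(A, B):
--     # Match B's numbers, smallest first, against the len(B) strongest numbers of A
--     # (taken in ascending order): a win advances to the next defender.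
--     tops = sorted(A, reverse=True)[:len(B)][::-1]
--     answer = 0
--     j = 0
--     for b in sorted(B):
--         if j < len(tops) and b > tops[j]:
--             answer += 1
--             j += 1
--     return answer
-- ===== Notes on version B (the rewrite author's own statement) =====
-- stated objective: simpler
-- what changed: Replaces the deque-based dual-ended greedy (pop the biggest B on a win, sacrifice the smallest B on a loss, walking A descending) by a single forward pointer: take the len(B) strongest A values in ascending order and scan B ascending, advancing the pointer only on a win.
import Mathlib
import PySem

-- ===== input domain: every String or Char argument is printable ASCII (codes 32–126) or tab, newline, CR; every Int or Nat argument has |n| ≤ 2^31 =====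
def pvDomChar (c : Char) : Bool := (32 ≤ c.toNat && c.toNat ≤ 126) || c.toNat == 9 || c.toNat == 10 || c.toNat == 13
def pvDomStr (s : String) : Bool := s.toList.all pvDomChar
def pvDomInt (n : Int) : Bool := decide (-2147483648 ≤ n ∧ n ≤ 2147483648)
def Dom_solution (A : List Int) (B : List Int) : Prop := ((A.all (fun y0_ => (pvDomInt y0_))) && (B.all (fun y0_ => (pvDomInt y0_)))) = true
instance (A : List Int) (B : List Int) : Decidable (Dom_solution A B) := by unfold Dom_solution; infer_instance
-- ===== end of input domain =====

-- B replaces A's descending dual-ended deque greedy by a single forward pointer over the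
-- len(B) strongest A values taken ascending; equal return values proved on Pre_ (len B ≤ len A).

-- ===== PORT A =====
-- the while-loop: q = the deque of remaining B values (descending), i the A-index, ans the counter;
-- `none` is exactly the IndexError Python raises when i runs past A (excluded by Pre_solution)
def solutionLoop (Ad : List Int) (q : List Int) (i : Int) (ans : Int) : Option Int :=
  match q with
  | [] => some ans
  | x :: rest =>
    match PySem.List.pyGet? Ad i with
    | none => none
    | some a =>
      if a < x then solutionLoop Ad rest (i + 1) (ans + 1)      -- queue[0] > A[i]: popleft, answer += 1
      else solutionLoop Ad ((x :: rest).dropLast) (i + 1) ans   -- else: pop (drop the right end)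
  termination_by q.length
  decreasing_by
  · simp
  · simp

def solution (A : List Int) (B : List Int) : Int :=
  let Ad := PySem.List.sorted A (fun x => x) true
  let Bd := PySem.List.sorted B (fun x => x) true
  ((solutionLoop Ad Bd 0 0).getD 0)   -- `.getD 0` only materialises the IndexError case, outside Pre_

-- ===== PORT B =====
-- for-loop of Source B: `j < len(tops) and b > tops[j]` — the left conjunct guards the index,
-- so the total pyGetD (whose default is never read) is exact here
def altLoop (tops : List Int) (bs : List Int) (j : Int) (ans : Int) : Int :=
  match bs with
  | [] => ans
  | b :: rest =>
    if j < (tops.length : Int) ∧ PySem.List.pyGetD tops j 0 < b then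
      altLoop tops rest (j + 1) (ans + 1)
    else
      altLoop tops rest j ans

def solution_alt (A : List Int) (B : List Int) : Int :=
  -- tops = sorted(A, reverse=True)[:len(B)][::-1]  ([::-1] is reverse: PySem.List.slice?_none_none_neg_one)
  let tops := (PySem.List.slice (PySem.List.sorted A (fun x => x) true) none (some (B.length : Int))).reverse
  altLoop tops (PySem.List.sorted B (fun x => x) false) 0 0

-- ===== PRECONDITION & SPEC =====
-- A raises IndexError exactly when len(B) > len(A); it returns on every other input.
def Pre_solution (A : List Int) (B : List Int) : Prop := B.length ≤ A.length
instance (A : List Int) (B : List Int) : Decidable (Pre_solution A B) := by unfold Pre_solution; infer_instance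
def pvWitness_solution : List Int × List Int := ([3, 1, 5, 7], [2, 6, 4])

def Spec_solution (A : List Int) (B : List Int) (out : Int) : Prop := out = solution_alt A B
instance (A : List Int) (B : List Int) (out : Int) : Decidable (Spec_solution A B out) := by unfold Spec_solution; infer_instance

-- ===== CLAIM (what is proved, stated in full; the proofs are below) =====
def Claim_equal_solution : Prop := ∀ (A : List Int) (B : List Int), Dom_solution A B → Pre_solution A B → Spec_solution A B (solution A B)

-- ===== LEMMAS AND PROOFS =====

-- proof-side model of B's two-pointer loop: ts = the tops not yet advanced past, bs = the B values left
def tp : List Int → List Int → Int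
  | _, [] => 0
  | [], _ :: _ => 0
  | t :: ts, b :: bs => if t < b then tp ts bs + 1 else tp (t :: ts) bs
  termination_by _ bs => bs.length

-- proof-side model of A's loop: gA q T, q the B-queue (descending), T the A values from index i on
def gA : List Int → List Int → Int
  | [], _ => 0
  | _ :: _, [] => 0
  | x :: rest, a :: T' => if a < x then gA rest T' + 1 else gA ((x :: rest).dropLast) T'
  termination_by q _ => q.length
  decreasing_by
  · simp
  · simp

lemma tp_nil_left (bs : List Int) : tp [] bs = 0 := by
  cases bs <;> simp [tp]

lemma altLoop_eq_tp (bs : List Int) : ∀ (tops : List Int) (j : Nat) (ans : Int),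
    altLoop tops bs (j : Int) ans = ans + tp (tops.drop j) bs := by
  induction bs with
  | nil => intro tops j ans; simp [altLoop, tp]
  | cons b rest ih =>
    intro tops j ans
    by_cases hj : j < tops.length
    · have hdrop : tops.drop j = tops[j] :: tops.drop (j + 1) := (List.getElem_cons_drop hj).symm
      have hget : PySem.List.pyGetD tops (j : Int) 0 = tops[j] := by
        simp [PySem.List.pyGetD_natCast, List.getD, hj]
      by_cases hb : tops[j] < b
      · rw [altLoop, if_pos ⟨by exact_mod_cast hj, by rw [hget]; exact hb⟩]
        have h2 : ((j : Int) + 1) = ((j + 1 : Nat) : Int) := by push_cast; ring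
        rw [h2, ih tops (j + 1) (ans + 1), hdrop, tp, if_pos hb]
        ring
      · rw [altLoop]
        have : ¬((j : Int) < (tops.length : Int) ∧ PySem.List.pyGetD tops (j : Int) 0 < b) := by
          simp [hget, hb]
        rw [if_neg this, ih tops j ans, hdrop, tp, if_neg hb, ← hdrop]
    · have hdrop : tops.drop j = [] := List.drop_eq_nil_of_le (by omega)
      rw [altLoop]
      have : ¬((j : Int) < (tops.length : Int) ∧ PySem.List.pyGetD tops (j : Int) 0 < b) :=
        fun h => hj (by exact_mod_cast h.1)
      rw [if_neg this, ih tops j ans, hdrop, tp_nil_left, tp_nil_left]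

lemma solutionLoop_eq_gA (n : Nat) : ∀ (q Ad : List Int) (i : Nat) (ans : Int),
    q.length = n → i + q.length ≤ Ad.length →
    solutionLoop Ad q (i : Int) ans = some (ans + gA q (Ad.drop i)) := by
  induction n with
  | zero =>
    intro q Ad i ans hn _
    obtain rfl : q = [] := List.eq_nil_of_length_eq_zero hn
    simp [solutionLoop, gA]
  | succ m ih =>
    intro q Ad i ans hn hlen
    obtain ⟨x, rest, rfl⟩ : ∃ x rest, q = x :: rest := by
      cases q with
      | nil => simp at hn
      | cons x rest => exact ⟨x, rest, rfl⟩
    have hi : i < Ad.length := by simp at hn hlen; omega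
    have hget : PySem.List.pyGet? Ad (i : Int) = some Ad[i] := by
      rw [PySem.List.pyGet?_natCast, List.getElem?_eq_getElem hi]
    have hdrop : Ad.drop i = Ad[i] :: Ad.drop (i + 1) := (List.getElem_cons_drop hi).symm
    have hcast : ((i : Int) + 1) = ((i + 1 : Nat) : Int) := by push_cast; ring
    rw [solutionLoop]
    simp only [hget]
    by_cases hb : Ad[i] < x
    · rw [if_pos hb, hcast, ih rest Ad (i + 1) (ans + 1) (by simpa using hn) (by simp at hn hlen ⊢; omega)]
      rw [hdrop, gA, if_pos hb]
      congr 1; ring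
    · rw [if_neg hb, hcast,
        ih ((x :: rest).dropLast) Ad (i + 1) ans (by simp at hn ⊢; omega) (by simp at hn hlen ⊢; omega)]
      rw [hdrop, gA, if_neg hb]

-- A's unbeatable top defender (≥ every attacker) can be removed without changing the count
lemma tp_append_last (bs : List Int) : ∀ (ts' : List Int) (t : Int),
    (∀ b ∈ bs, ¬ t < b) → tp (ts' ++ [t]) bs = tp ts' bs := by
  induction bs with
  | nil => intro ts' t _; simp [tp]
  | cons b rest ih =>
    intro ts' t hall
    cases ts' with
    | nil =>
      simp only [List.nil_append, tp_nil_left]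
      rw [tp, if_neg (hall b (by simp))]
      exact ih [] t (fun b hb => hall b (by simp [hb])) ▸ tp_nil_left rest
    | cons t' ts'' =>
      rw [List.cons_append, tp, tp]
      by_cases h : t' < b
      · rw [if_pos h, if_pos h, ih ts'' t (fun b hb => hall b (by simp [hb]))]
      · rw [if_neg h, if_neg h, ← List.cons_append,
          ih (t' :: ts'') t (fun b hb => hall b (by simp [hb]))]

-- with strictly more attackers than defenders, the weakest attacker is redundant
lemma tp_tail (bs : List Int) : ∀ (ts : List Int),
    bs.Pairwise (· ≤ ·) → ts.length < bs.length → tp ts bs = tp ts bs.tail := by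
  induction bs with
  | nil => intro ts _ h; simp at h
  | cons b0 rest ih =>
    intro ts hpw hlen
    cases ts with
    | nil => simp [tp_nil_left]
    | cons t ts1 =>
      simp only [List.tail_cons]
      by_cases h : t < b0
      · rw [tp, if_pos h]
        cases rest with
        | nil => simp at hlen
        | cons b1 bs2 =>
          have hb01 : b0 ≤ b1 := (List.pairwise_cons.mp hpw).1 b1 (by simp)
          rw [tp, if_pos (lt_of_lt_of_le h hb01)]
          have := ih ts1 (List.Pairwise.of_cons hpw) (by simp at hlen ⊢; omega)
          simp only [List.tail_cons] at this
          rw [this]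
      · rw [tp, if_neg h]

-- when the strongest attacker beats the strongest defender, they pair off
lemma tp_last_win (bs' : List Int) : ∀ (ts' : List Int) (a x : Int),
    (ts' ++ [a]).Pairwise (· ≤ ·) → a < x → bs'.length ≤ ts'.length →
    tp (ts' ++ [a]) (bs' ++ [x]) = tp ts' bs' + 1 := by
  induction bs' with
  | nil =>
    intro ts' a x hpw hax _
    cases ts' with
    | nil => simp [tp, hax]
    | cons t tt =>
      have ht : t < x := by
        have : t ≤ a := (List.pairwise_cons.mp hpw).1 a (by simp)
        omega
      rw [List.cons_append, List.nil_append]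
      simp [tp, ht]
  | cons b bs'' ih =>
    intro ts' a x hpw hax hlen
    cases ts' with
    | nil => simp at hlen
    | cons t ts'' =>
      rw [List.cons_append, List.cons_append, tp, tp]
      by_cases h : t < b
      · rw [if_pos h, if_pos h,
          ih ts'' a x (List.Pairwise.of_cons (by rwa [List.cons_append] at hpw)) hax (by simp at hlen; omega)]
      · rw [if_neg h, if_neg h, ← List.cons_append,
          ih (t :: ts'') a x (by rwa [List.cons_append] at hpw) hax (by simp at hlen ⊢; omega)]

-- the deque greedy equals the two-pointer count on the reversed (ascending) lists
lemma gA_eq_tp (n : Nat) : ∀ (q T : List Int),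
    q.Pairwise (fun a b => b ≤ a) → T.Pairwise (fun a b => b ≤ a) →
    q.length = n → n ≤ T.length →
    gA q T = tp ((T.take n).reverse) q.reverse := by
  induction n with
  | zero =>
    intro q T _ _ hn _
    obtain rfl : q = [] := List.eq_nil_of_length_eq_zero hn
    simp [gA, tp]
  | succ m ih =>
    intro q T hq hT hn hlen
    obtain ⟨x, rest, rfl⟩ : ∃ x rest, q = x :: rest := by
      cases q with
      | nil => simp at hn
      | cons x rest => exact ⟨x, rest, rfl⟩
    obtain ⟨a, T', rfl⟩ : ∃ a T', T = a :: T' := by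
      cases T with
      | nil => simp at hlen
      | cons a T' => exact ⟨a, T', rfl⟩
    have hm : m ≤ T'.length := by simp at hlen; omega
    have hrm : rest.length = m := by simp at hn; omega
    have htake : ((a :: T').take (m + 1)).reverse = (T'.take m).reverse ++ [a] := by
      simp [List.take_succ_cons]
    have hts'len : (T'.take m).reverse.length = m := by
      simp [List.length_take]; omega
    have hpwts : ((T'.take m).reverse ++ [a]).Pairwise (· ≤ ·) := by
      rw [show (T'.take m).reverse ++ [a] = (a :: T'.take m).reverse by simp,
        List.pairwise_reverse]
      exact hT.sublist (List.cons_sublist_cons.mpr (List.take_sublist m T'))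
    rw [gA]
    by_cases hb : a < x
    · rw [if_pos hb, htake]
      have : (x :: rest).reverse = rest.reverse ++ [x] := by simp
      rw [this, tp_last_win rest.reverse ((T'.take m).reverse) a x hpwts hb (by simp [hts'len, hrm])]
      rw [ih rest T' (List.Pairwise.of_cons hq) (List.Pairwise.of_cons hT) hrm hm]
    · rw [if_neg hb, htake]
      have hall : ∀ b ∈ (x :: rest).reverse, ¬ a < b := by
        intro b hbmem
        rw [List.mem_reverse] at hbmem
        have hbx : b ≤ x := by
          rcases List.mem_cons.mp hbmem with rfl | hmem
          · exact le_refl b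
          · exact (List.pairwise_cons.mp hq).1 b hmem
        omega
      rw [tp_append_last ((x :: rest).reverse) ((T'.take m).reverse) a hall]
      rw [tp_tail ((x :: rest).reverse) ((T'.take m).reverse)
        (by rw [List.pairwise_reverse]; exact hq) (by simp [hts'len, hrm])]
      rw [List.tail_reverse]
      rw [ih ((x :: rest).dropLast) T' (hq.sublist (List.dropLast_sublist _))
        (List.Pairwise.of_cons hT) (by simp [hrm]) hm]

-- Python's sorted(·, reverse=True) on Ints is the reverse of sorted(·)
lemma sorted_rev_eq_reverse (l : List Int) :
    PySem.List.sorted l (fun x => x) true = (PySem.List.sorted l (fun x => x) false).reverse := by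
  apply List.Perm.eq_of_pairwise (le := fun p q => (q : Int) ≤ p)
  · intro p q _ _ h1 h2; omega
  · exact PySem.List.sorted_pairwise_rev l (fun x => x)
  · rw [List.pairwise_reverse]
    exact PySem.List.sorted_pairwise l (fun x => x)
  · exact ((PySem.List.sorted_perm l (fun x => x) true).trans
      ((PySem.List.sorted_perm l (fun x => x) false).symm)).trans
      (List.reverse_perm _).symm

-- ===== VERDICT (by name: the statement is the Claim_ definition above) =====
theorem solution_spec : Claim_equal_solution := by
  intro A B _ hpre
  unfold Spec_solution solution solution_alt
  simp only []
  set Ad := PySem.List.sorted A (fun x => x) true with hAd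
  set Bd := PySem.List.sorted B (fun x => x) true with hBd
  have hlenA : Ad.length = A.length := PySem.List.length_sorted A _ _
  have hlenB : Bd.length = B.length := PySem.List.length_sorted B _ _
  have hpre' : B.length ≤ A.length := hpre
  have hA := solutionLoop_eq_gA Bd.length Bd Ad 0 0 rfl (by omega)
  have hB := altLoop_eq_tp (PySem.List.sorted B (fun x => x) false)
    ((PySem.List.slice Ad none (some (B.length : Int))).reverse) 0 0
  simp only [Nat.cast_zero, List.drop_zero, zero_add] at hA hB
  rw [hA, Option.getD_some,
    gA_eq_tp Bd.length Bd Ad (PySem.List.sorted_pairwise_rev B _) (PySem.List.sorted_pairwise_rev A _) rfl (by omega),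
    hB]
  congr 1
  · rw [PySem.List.slice_to_natCast, hlenB]
  · rw [hBd, sorted_rev_eq_reverse, List.reverse_reverse]
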